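-- pv_equiv track=rewrite | github.com/marhoy/googleCodeJam | 2018/qualification_round/01_saving_the_universe_again.py | robot_damage
-- ===== SOURCE A (Python) =====
-- def robot_damage(program):
--     damage = 0
--     power = 1
--     for char in program:
--         if char == 'S':
--             damage = damage + power
--         if char == 'C':
--             power = power * 2
--     return damage
-- ===== SOURCE B (Python) =====
-- def robot_damage(program):
--     return sum(seg.count('S') * 2 ** i for i, seg in enumerate(program.split('C')))
-- ===== Notes on version B (the rewrite author's own statement) =====
-- stated objective: alternative
-- what changed: Replaces the per-character damage/power accumulator loop by splitting the program at charge points and summing each segment's shot count weighted by 2**segment_index.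
import Mathlib
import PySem

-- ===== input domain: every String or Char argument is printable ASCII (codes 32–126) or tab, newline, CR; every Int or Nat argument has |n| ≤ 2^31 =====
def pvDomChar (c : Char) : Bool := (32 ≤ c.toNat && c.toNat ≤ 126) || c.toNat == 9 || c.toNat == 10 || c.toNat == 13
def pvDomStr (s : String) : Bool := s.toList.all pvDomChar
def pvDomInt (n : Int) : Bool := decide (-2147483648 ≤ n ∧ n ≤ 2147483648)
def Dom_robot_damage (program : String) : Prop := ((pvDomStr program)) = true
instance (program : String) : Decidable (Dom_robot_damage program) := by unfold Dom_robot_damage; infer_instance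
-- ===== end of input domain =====

-- B replaces A's running damage/power accumulator by splitting on 'C' and summing
-- segment 'S'-counts weighted by 2^index (alternative decomposition, same cost).

-- ===== PORT A =====
def robot_damage (program : String) : Int :=
  (program.toList.foldl
    (fun (st : Int × Int) char =>
      let st := if char = 'S' then (st.1 + st.2, st.2) else st
      if char = 'C' then (st.1, st.2 * 2) else st)
    (0, 1)).1

-- ===== PORT B =====
def robot_damage_alt (program : String) : Int :=
  ((PySem.List.enumerate ((PySem.Str.split? program "C").getD [])).map
    (fun p => (PySem.Str.count p.2 "S" : Int) * 2 ^ p.1.toNat)).sum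

-- ===== PRECONDITION & SPEC =====
def Spec_robot_damage (program : String) (out : Int) : Prop := out = robot_damage_alt program
instance (program : String) (out : Int) : Decidable (Spec_robot_damage program out) := by unfold Spec_robot_damage; infer_instance

-- ===== CLAIM (what is proved, stated in full; the proofs are below) =====
def Claim_equal_robot_damage : Prop := ∀ (program : String), Dom_robot_damage program → Spec_robot_damage program (robot_damage program)

-- ===== LEMMAS AND PROOFS =====

/-- Common reference value: weighted 'S' count. -/
def pvW : List Char → Int
  | [] => 0
  | c :: t => (if c = 'S' then 1 else 0) + (if c = 'C' then 2 * pvW t else pvW t)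

theorem pvA_foldl (l : List Char) : ∀ (d p : Int),
    (l.foldl
      (fun (st : Int × Int) char =>
        let st := if char = 'S' then (st.1 + st.2, st.2) else st
        if char = 'C' then (st.1, st.2 * 2) else st)
      (d, p)).1 = d + p * pvW l := by
  induction l with
  | nil => intro d p; simp [pvW]
  | cons c t ih =>
    intro d p
    by_cases hS : c = 'S' <;> by_cases hC : c = 'C' <;>
      simp [List.foldl_cons, hS, hC, ih, pvW] <;> ring
  
theorem pv_count_go (c : Char) : ∀ (fuel : Nat) (l : List Char) (acc : Nat),
    l.length ≤ fuel → PySem.Chars.count.go [c] fuel l acc = acc + l.count c := by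
  intro fuel
  induction fuel with
  | zero => intro l acc h; interval_cases hl : l.length <;> simp_all [PySem.Chars.count.go]
  | succ f ih =>
    intro l acc h
    cases l with
    | nil => simp [PySem.Chars.count.go]
    | cons a t =>
      simp only [PySem.Chars.count.go, List.isPrefixOf, List.isPrefixOf_nil_left, Bool.and_true]
      by_cases hac : c = a
      · subst hac
        simp only [beq_self_eq_true, if_true, List.length_cons, List.length_nil,
          List.drop_succ_cons, List.drop_zero]
        rw [ih t (acc + 1) (by simpa using Nat.le_of_succ_le_succ h)]
        simp [List.count_cons]
        omega
      · have hcne : (c == a) = false := by simp [hac]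
        rw [hcne]
        simp only [Bool.false_eq_true, if_false]
        rw [ih t acc (by simpa using Nat.le_of_succ_le_succ h)]
        simp [List.count_cons, Ne.symm hac]

theorem pv_count_single (c : Char) (l : List Char) :
    PySem.Chars.count l [c] = l.count c := by
  simp [PySem.Chars.count, pv_count_go c l.length l 0 (le_refl _)]

theorem pv_splitOn_go (c : Char) : ∀ (fuel : Nat) (l cur : List Char) (acc : List (List Char)),
    l.length ≤ fuel →
    PySem.Chars.splitOn.go [c] fuel l cur acc
      = acc.reverse ++ (List.splitOnP (fun x => x == c) l).modifyHead (cur.reverse ++ ·) := by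
  intro fuel
  induction fuel with
  | zero =>
    intro l cur acc h
    interval_cases hl : l.length <;> simp_all [PySem.Chars.splitOn.go, List.splitOnP_nil]
  | succ f ih =>
    intro l cur acc h
    cases l with
    | nil => simp [PySem.Chars.splitOn.go, List.splitOnP_nil]
    | cons a t =>
      simp only [PySem.Chars.splitOn.go, List.isPrefixOf, List.isPrefixOf_nil_left, Bool.and_true]
      by_cases hac : c = a
      · subst hac
        simp only [beq_self_eq_true, if_true, List.length_cons, List.length_nil,
          List.drop_succ_cons, List.drop_zero]
        rw [ih t [] (cur.reverse :: acc) (by simpa using Nat.le_of_succ_le_succ h)]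
        simp only [List.splitOnP_cons, beq_self_eq_true, if_true, List.reverse_nil,
          List.nil_append]
        cases List.splitOnP (fun x => x == c) t <;> simp
      · have hba : (a == c) = false := by simp; exact fun h' => hac h'.symm
        have hcne : (c == a) = false := by simp [hac]
        rw [hcne]
        simp only [Bool.false_eq_true, if_false]
        rw [ih t (a :: cur) acc (by simpa using Nat.le_of_succ_le_succ h)]
        rw [List.splitOnP_cons, hba]
        cases hsp : List.splitOnP (fun x => x == c) t with
        | nil => exact absurd hsp (List.splitOnP_ne_nil _ t)
        | cons hseg rest => simp

theorem pv_splitOn_single (c : Char) (l : List Char) :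
    PySem.Chars.splitOn l [c] = List.splitOnP (fun x => x == c) l := by
  rw [PySem.Chars.splitOn, pv_splitOn_go c (l.length + 1) l [] [] (Nat.le_succ _)]
  cases hsp : List.splitOnP (fun x => x == c) l with
  | nil => exact absurd hsp (List.splitOnP_ne_nil _ l)
  | cons hseg rest => simp

theorem pvB_sum (l : List Char) : ∀ (k : Nat),
    ((PySem.List.enumerate (List.splitOnP (fun x => x == 'C') l) (k : Int)).map
      (fun p => ((p.2.count 'S' : Int)) * 2 ^ p.1.toNat)).sum = 2 ^ k * pvW l := by
  induction l with
  | nil =>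
    intro k
    simp [List.splitOnP_nil, PySem.List.enumerate_cons, PySem.List.enumerate_nil, pvW]
  | cons a t ih =>
    intro k
    by_cases hC : a = 'C'
    · subst hC
      rw [List.splitOnP_cons]
      simp only [beq_self_eq_true, if_true, PySem.List.enumerate_cons, List.map_cons, List.sum_cons]
      have : ((k : Int) + 1) = ((k + 1 : Nat) : Int) := by push_cast; ring
      rw [this, ih (k + 1)]
      simp [pvW, pow_succ]
      ring
    · have hba : (a == 'C') = false := by simpa using hC
      cases hsp : List.splitOnP (fun x => x == 'C') t with
      | nil => exact absurd hsp (List.splitOnP_ne_nil _ t)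
      | cons hseg rest =>
        have iht := ih k
        rw [hsp] at iht
        simp only [PySem.List.enumerate_cons, List.map_cons, List.sum_cons,
          Int.toNat_natCast] at iht
        simp only [List.splitOnP_cons, hba, Bool.false_eq_true, if_false, hsp, List.modifyHead,
          PySem.List.enumerate_cons, List.map_cons, List.sum_cons, Int.toNat_natCast,
          List.count_cons]
        by_cases hS : a = 'S' <;> simp [pvW, hS, hC] <;> push_cast <;> linarith [iht]

theorem pv_enum_map_sum (g : List Char → String) (f : Int → String → Int) :
    ∀ (xs : List (List Char)) (k : Int),
    ((PySem.List.enumerate (xs.map g) k).map (fun p => f p.1 p.2)).sum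
      = ((PySem.List.enumerate xs k).map (fun p => f p.1 (g p.2))).sum := by
  intro xs
  induction xs with
  | nil => intro k; simp [PySem.List.enumerate_nil]
  | cons x t ih => intro k; simp [PySem.List.enumerate_cons, ih]

theorem pv_alt_eq (program : String) : robot_damage_alt program = pvW program.toList := by
  have hsplit : PySem.Str.split? program "C"
      = some ((PySem.Chars.splitOn program.toList ['C']).map String.ofList) := by
    simp [PySem.Str.split?, PySem.Chars.split?]
  rw [robot_damage_alt, hsplit]
  simp only [Option.getD_some]
  rw [pv_enum_map_sum String.ofList (fun i s => (PySem.Str.count s "S" : Int) * 2 ^ i.toNat)]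
  have hcnt : ∀ (seg : List Char), PySem.Str.count (String.ofList seg) "S" = seg.count 'S' := by
    intro seg
    rw [PySem.Str.count_eq]
    simpa using pv_count_single 'S' (String.ofList seg).toList
  simp only [hcnt, pv_splitOn_single]
  simpa using pvB_sum program.toList 0

-- ===== VERDICT (by name: the statement is the Claim_ definition above) =====
theorem robot_damage_spec : Claim_equal_robot_damage := by
  intro program _
  unfold Spec_robot_damage robot_damage
  rw [pv_alt_eq, pvA_foldl]
  ring
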